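-- pv_equiv track=rewrite | github.com/4294967296zz/Python-Workouts | fibo_matrixB04.py | fiboMatrix
-- ===== SOURCE A (Python) =====
-- def divider( N ) :
--     f = N
--     arr = [ f ]
--
--     while( f > 3 ) :
--         f = f // 2
--         arr += [ f ]
--
--     return arr
--
-- def matMUL( X, Y ) :
--     a = X[ 0 ][ 0 ] * Y[ 0 ][ 0 ] + X[ 0 ][ 1 ] * Y[ 1 ][ 0 ]
--     b = X[ 0 ][ 0 ] * Y[ 0 ][ 1 ] + X[ 0 ][ 1 ] * Y[ 1 ][ 1 ]
--     c = X[ 1 ][ 0 ] * Y[ 0 ][ 0 ] + X[ 1 ][ 1 ] * Y[ 1 ][ 0 ]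
--     d = X[ 1 ][ 0 ] * Y[ 0 ][ 1 ] + X[ 1 ][ 1 ] * Y[ 1 ][ 1 ]
--     f = [ [ a, b ], [ c, d ] ]
--
--     return f
--
-- def fiboMatrix( N ) :
--     UN = [ [ 1, 0 ], [ 0, 1 ] ]
--     U0 = [ [ 0, 0 ], [ 0, 0 ] ]
--     U1 = [ [ 1, 1 ], [ 1, 0 ] ]
--     U2 = [ [ 2, 1 ], [ 1, 1 ] ]
--
--     UA = [ UN, U1 ]
--     FM = [ U0, U1, U2 ] + [ U0 ] * ( N - 2 )
--
--     count = divider( N )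
--     k = 2
--
--     while( k < N ) :
--         k = count.pop()
--         FM[ k ] = matMUL( FM[ k // 2 ], FM[ k // 2 ] )
--         FM[ k ] = matMUL( FM[ k ], UA[ k & 1 ] )
--
--     return FM
-- ===== SOURCE B (Python) =====
-- def fiboMatrix(N):
--     # Chain values are computed as quadruples in a dict keyed by index, then the
--     # output list is produced in one comprehension over the base list.
--     def tmul(x, y):
--         a, b, c, d = x
--         e, f, g, h = y
--         return (a * e + b * g, a * f + b * h, c * e + d * g, c * f + d * h)
--
--     def chainvals(k):
--         if k > 3:
--             vals = chainvals(k // 2)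
--             p = vals[k // 2]
--         else:
--             vals = {}
--             p = (1, 1, 1, 0)
--         sq = tmul(p, p)
--         vals[k] = tmul(sq, (1, 1, 1, 0)) if k & 1 else sq
--         return vals
--
--     vals = chainvals(N) if N > 2 else {}
--     base = [[[0, 0], [0, 0]], [[1, 1], [1, 0]], [[2, 1], [1, 1]]] \
--            + [[[0, 0], [0, 0]]] * (N - 2)
--     return [[[v[0], v[1]], [v[2], v[3]]] if (v := vals.get(i)) is not None else m
--             for i, m in enumerate(base)]
-- ===== Notes on version B (the rewrite author's own statement) =====
-- stated objective: alternative
-- what changed: Instead of A's divider index list and while/pop loop mutating the big result list in place, B computes the halving-chain matrices as integer quadruples in a small dict via one recursive helper and then produces the output list in a single comprehension over the base list (skipping A's multiplication by the identity matrix for even indices).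
import Mathlib
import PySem

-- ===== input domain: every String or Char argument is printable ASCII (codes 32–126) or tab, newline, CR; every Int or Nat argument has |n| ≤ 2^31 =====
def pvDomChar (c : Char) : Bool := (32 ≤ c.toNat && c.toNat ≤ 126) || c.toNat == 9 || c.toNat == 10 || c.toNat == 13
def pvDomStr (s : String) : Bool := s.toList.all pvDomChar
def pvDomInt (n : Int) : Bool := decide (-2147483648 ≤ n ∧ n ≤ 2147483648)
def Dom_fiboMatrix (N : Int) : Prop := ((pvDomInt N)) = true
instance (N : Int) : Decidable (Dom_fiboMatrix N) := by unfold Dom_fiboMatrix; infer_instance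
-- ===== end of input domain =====

-- B replaces A's divider list + while/pop in-place mutation with a dict of quadruple chain
-- values built by one recursive helper, then one pass building the output list (objective: alternative).

-- shared constant matrices of A (the Python defines the same literals locally)
def pvUN : List (List Int) := [[1, 0], [0, 1]]
def pvU0 : List (List Int) := [[0, 0], [0, 0]]
def pvU1 : List (List Int) := [[1, 1], [1, 0]]
def pvU2 : List (List Int) := [[2, 1], [1, 1]]

-- ===== PORT A =====
-- X[i][j]: every access in matMUL is on a 2×2 matrix built by the program, so getD with index 0/1 is exact
def matMUL (X Y : List (List Int)) : List (List Int) :=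
  let a := (X.getD 0 []).getD 0 0 * (Y.getD 0 []).getD 0 0 + (X.getD 0 []).getD 1 0 * (Y.getD 1 []).getD 0 0
  let b := (X.getD 0 []).getD 0 0 * (Y.getD 0 []).getD 1 0 + (X.getD 0 []).getD 1 0 * (Y.getD 1 []).getD 1 0
  let c := (X.getD 1 []).getD 0 0 * (Y.getD 0 []).getD 0 0 + (X.getD 1 []).getD 1 0 * (Y.getD 1 []).getD 0 0
  let d := (X.getD 1 []).getD 0 0 * (Y.getD 0 []).getD 1 0 + (X.getD 1 []).getD 1 0 * (Y.getD 1 []).getD 1 0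
  [[a, b], [c, d]]

def dividerLoop (f : Int) (arr : List Int) : List Int :=
  if _h : f > 3 then
    dividerLoop (PySem.Int.floordiv f 2) (arr ++ [PySem.Int.floordiv f 2])
  else arr
termination_by f.toNat
decreasing_by
  have : PySem.Int.floordiv f 2 = f / 2 := PySem.Int.floordiv_eq_ediv_of_pos (by omega)
  omega

def divider (N : Int) : List Int := dividerLoop N [N]

-- the while loop of fiboMatrix; state = (count, FM, k).  count.pop() on an empty list is
-- Python's IndexError; that state is unreachable from fiboMatrix (the loop stops at k = N first)
def fiboLoop (N : Int) (count : List Int) (FM : List (List (List Int))) (k : Int) :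
    List (List (List Int)) :=
  if k < N then
    match h : PySem.List.pop? count with
    | none => FM
    | some (kk, rest) =>
      let FM1 := PySem.List.pySetD FM kk
        (matMUL (PySem.List.pyGetD FM (PySem.Int.floordiv kk 2) [])
                (PySem.List.pyGetD FM (PySem.Int.floordiv kk 2) []))
      let FM2 := PySem.List.pySetD FM1 kk
        (matMUL (PySem.List.pyGetD FM1 kk [])
                (PySem.List.pyGetD [pvUN, pvU1] (PySem.Int.band kk 1) []))
      fiboLoop N rest FM2 kk
  else FM
termination_by count.length
decreasing_by
  have := PySem.List.length_of_pop?_eq_some count h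
  simp at this ⊢
  omega

def fiboMatrix (N : Int) : List (List (List Int)) :=
  let FM := [pvU0, pvU1, pvU2] ++ List.replicate (N - 2).toNat pvU0
  let count := divider N
  fiboLoop N count FM 2

-- ===== PORT B =====
-- 2×2 matrices as quadruples (a, b, c, d) standing for the rows of the matrix
def tmulB (x y : Int × Int × Int × Int) : Int × Int × Int × Int :=
  match x, y with
  | (a, b, c, d), (e, f, g, h) =>
    (a * e + b * g, a * f + b * h, c * e + d * g, c * f + d * h)

-- vals[k // 2] is always present after the recursive call, so the .getD default is unreachable
def chainvalsB (k : Int) : PySem.Dict Int (Int × Int × Int × Int) :=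
  let vp : PySem.Dict Int (Int × Int × Int × Int) × (Int × Int × Int × Int) :=
    if _h : k > 3 then
      let vals := chainvalsB (PySem.Int.floordiv k 2)
      (vals, (vals.get? (PySem.Int.floordiv k 2)).getD (0, 0, 0, 0))
    else
      (PySem.Dict.empty, (1, 1, 1, 0))
  let sq := tmulB vp.2 vp.2
  vp.1.insert k (if PySem.Int.band k 1 = 0 then sq else tmulB sq (1, 1, 1, 0))
termination_by k.toNat
decreasing_by
  have : PySem.Int.floordiv k 2 = k / 2 := PySem.Int.floordiv_eq_ediv_of_pos (by omega)
  omega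

def fiboMatrix_alt (N : Int) : List (List (List Int)) :=
  let vals := if N > 2 then chainvalsB N else PySem.Dict.empty
  let base : List (List (List Int)) :=
    [[[0, 0], [0, 0]], [[1, 1], [1, 0]], [[2, 1], [1, 1]]] ++
      List.replicate (N - 2).toNat [[0, 0], [0, 0]]
  (PySem.List.enumerate base).map (fun im =>
    match vals.get? im.1 with
    | some v => [[v.1, v.2.1], [v.2.2.1, v.2.2.2]]
    | none => im.2)

-- ===== PRECONDITION & SPEC =====
def Spec_fiboMatrix (N : Int) (out : List (List (List Int))) : Prop := out = fiboMatrix_alt N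
instance (N : Int) (out : List (List (List Int))) : Decidable (Spec_fiboMatrix N out) := by
  unfold Spec_fiboMatrix; infer_instance

-- ===== CLAIM (what is proved, stated in full; the proofs are below) =====
def Claim_equal_fiboMatrix : Prop := ∀ (N : Int), Dom_fiboMatrix N → Spec_fiboMatrix N (fiboMatrix N)

-- ===== LEMMAS AND PROOFS =====

def toMat (v : Int × Int × Int × Int) : List (List Int) := [[v.1, v.2.1], [v.2.2.1, v.2.2.2]]

def applyV (d : PySem.Dict Int (Int × Int × Int × Int)) (FM : List (List (List Int))) :
    List (List (List Int)) :=
  (PySem.List.enumerate FM).map (fun im =>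
    match d.get? im.1 with
    | some v => toMat v
    | none => im.2)

-- B's recursion as a function of (FM, k) written in A's vocabulary: the intermediate form
-- both ports are reduced to
def fillB (FM : List (List (List Int))) (k : Int) : List (List (List Int)) :=
  let FM' := if _h : k > 3 then fillB FM (PySem.Int.floordiv k 2) else FM
  let sq := matMUL (PySem.List.pyGetD FM' (PySem.Int.floordiv k 2) [])
                   (PySem.List.pyGetD FM' (PySem.Int.floordiv k 2) [])
  PySem.List.pySetD FM' k
    (matMUL sq (PySem.List.pyGetD [pvUN, pvU1] (PySem.Int.band k 1) []))
termination_by k.toNat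
decreasing_by
  have : PySem.Int.floordiv k 2 = k / 2 := PySem.Int.floordiv_eq_ediv_of_pos (by omega)
  omega

-- one iteration of A's while loop, as a function of (FM, k)
def stepA (FM : List (List (List Int))) (kk : Int) : List (List (List Int)) :=
  PySem.List.pySetD
    (PySem.List.pySetD FM kk
      (matMUL (PySem.List.pyGetD FM (PySem.Int.floordiv kk 2) [])
              (PySem.List.pyGetD FM (PySem.Int.floordiv kk 2) [])))
    kk
    (matMUL
      (PySem.List.pyGetD
        (PySem.List.pySetD FM kk
          (matMUL (PySem.List.pyGetD FM (PySem.Int.floordiv kk 2) [])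
                  (PySem.List.pyGetD FM (PySem.Int.floordiv kk 2) [])))
        kk [])
      (PySem.List.pyGetD [pvUN, pvU1] (PySem.Int.band kk 1) []))

lemma fillB_step (FM : List (List (List Int))) (k : Int) (hk : ¬ k > 3) :
    fillB FM k =
      PySem.List.pySetD FM k
        (matMUL (matMUL (PySem.List.pyGetD FM (PySem.Int.floordiv k 2) [])
                    (PySem.List.pyGetD FM (PySem.Int.floordiv k 2) []))
              (PySem.List.pyGetD [pvUN, pvU1] (PySem.Int.band k 1) [])) := by
  rw [fillB]; simp [hk]

lemma fillB_step_big (FM : List (List (List Int))) (k : Int) (hk : k > 3) :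
    fillB FM k =
      PySem.List.pySetD (fillB FM (PySem.Int.floordiv k 2)) k
        (matMUL (matMUL (PySem.List.pyGetD (fillB FM (PySem.Int.floordiv k 2)) (PySem.Int.floordiv k 2) [])
                    (PySem.List.pyGetD (fillB FM (PySem.Int.floordiv k 2)) (PySem.Int.floordiv k 2) []))
              (PySem.List.pyGetD [pvUN, pvU1] (PySem.Int.band k 1) [])) := by
  rw [fillB]; simp [hk]

lemma fillB_length (FM : List (List (List Int))) (k : Int) :
    (fillB FM k).length = FM.length := by
  have H : ∀ n : Nat, ∀ k : Int, k.toNat = n → ∀ FM : List (List (List Int)),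
      (fillB FM k).length = FM.length := by
    intro n
    induction n using Nat.strong_induction_on with
    | _ n ih =>
      intro k hk FM
      by_cases h : k > 3
      · have hd : PySem.Int.floordiv k 2 = k / 2 := PySem.Int.floordiv_eq_ediv_of_pos (by omega)
        rw [fillB_step_big FM k h, PySem.List.length_pySetD]
        exact ih (PySem.Int.floordiv k 2).toNat (by omega) _ rfl FM
      · rw [fillB_step FM k h, PySem.List.length_pySetD]
  exact H k.toNat k rfl FM

-- A's two in-place updates at index kk equal one combined update, once kk is a valid index
lemma stepA_eq (FM : List (List (List Int))) (kk : Int) (h0 : 0 ≤ kk)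
    (h1 : kk < (FM.length : Int)) :
    stepA FM kk =
      PySem.List.pySetD FM kk
        (matMUL (matMUL (PySem.List.pyGetD FM (PySem.Int.floordiv kk 2) [])
                    (PySem.List.pyGetD FM (PySem.Int.floordiv kk 2) []))
              (PySem.List.pyGetD [pvUN, pvU1] (PySem.Int.band kk 1) [])) := by
  obtain ⟨m, rfl⟩ : ∃ m : Nat, kk = (m : Int) := ⟨kk.toNat, by omega⟩
  have hm : m < FM.length := by exact_mod_cast h1
  unfold stepA
  simp only [PySem.List.pySetD_natCast, PySem.List.pyGetD_natCast]
  rw [List.getD_eq_getElem _ _ (by simpa using hm)]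
  rw [List.getElem_set_self]
  rw [List.set_set]

-- popping the last element of the count list performs exactly one iteration of A's loop
lemma fiboLoop_pop (N : Int) (xs : List Int) (e : Int) (FM : List (List (List Int)))
    (k0 : Int) (h : k0 < N) :
    fiboLoop N (xs ++ [e]) FM k0 = fiboLoop N xs (stepA FM e) e := by
  rw [fiboLoop, if_pos h]
  split
  · next heq => rw [PySem.List.pop?_last] at heq; cases heq
  · next kk rest heq =>
      rw [PySem.List.pop?_last] at heq
      injection heq with h2
      cases h2
      rfl

lemma dividerLoop_append (g : Int) (a b : List Int) :
    dividerLoop g (a ++ b) = a ++ dividerLoop g b := by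
  have H : ∀ n : Nat, ∀ g : Int, g.toNat = n → ∀ a b : List Int,
      dividerLoop g (a ++ b) = a ++ dividerLoop g b := by
    intro n
    induction n using Nat.strong_induction_on with
    | _ n ih =>
      intro g hg a b
      by_cases h : g > 3
      · have hd : PySem.Int.floordiv g 2 = g / 2 := PySem.Int.floordiv_eq_ediv_of_pos (by omega)
        rw [dividerLoop, dif_pos h]
        conv_rhs => rw [dividerLoop, dif_pos h]
        rw [List.append_assoc]
        exact ih (PySem.Int.floordiv g 2).toNat (by omega) _ rfl a (b ++ [PySem.Int.floordiv g 2])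
      · rw [dividerLoop, dif_neg h]
        conv_rhs => rw [dividerLoop, dif_neg h]
  exact H g.toNat g rfl a b

lemma divider_big (f : Int) (hf : f > 3) :
    divider f = f :: divider (PySem.Int.floordiv f 2) := by
  unfold divider
  rw [dividerLoop, dif_pos hf,
      show ([f] ++ [PySem.Int.floordiv f 2] : List Int)
        = [f] ++ ([PySem.Int.floordiv f 2] ++ []) by simp,
      dividerLoop_append,
      show ([PySem.Int.floordiv f 2] ++ [] : List Int)
        = [PySem.Int.floordiv f 2] by simp]
  rfl

lemma divider_small (f : Int) (hf : ¬ f > 3) : divider f = [f] := by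
  unfold divider; rw [dividerLoop, dif_neg hf]

lemma fiboLoop_done (N : Int) (count : List Int) (FM : List (List (List Int))) (k : Int)
    (h : ¬ k < N) : fiboLoop N count FM k = FM := by
  rw [fiboLoop, if_neg h]

-- processing A's divider chain from the end equals the recursive fill
lemma loop_chain (N : Int) : ∀ f : Int, 2 ≤ f → f ≤ N →
    ∀ (xs : List Int) (FM : List (List (List Int))) (k0 : Int), k0 < N →
    f < (FM.length : Int) →
    fiboLoop N (xs ++ divider f) FM k0 = fiboLoop N xs (fillB FM f) f := by
  have H : ∀ n : Nat, ∀ f : Int, f.toNat = n → 2 ≤ f → f ≤ N →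
      ∀ (xs : List Int) (FM : List (List (List Int))) (k0 : Int), k0 < N →
      f < (FM.length : Int) →
      fiboLoop N (xs ++ divider f) FM k0 = fiboLoop N xs (fillB FM f) f := by
    intro n
    induction n using Nat.strong_induction_on with
    | _ n ih =>
      intro f hfn h2 hN xs FM k0 hk0 hlen
      by_cases hf : f > 3
      · have hd : PySem.Int.floordiv f 2 = f / 2 := PySem.Int.floordiv_eq_ediv_of_pos (by omega)
        rw [divider_big f hf,
            show xs ++ (f :: divider (PySem.Int.floordiv f 2))
              = (xs ++ [f]) ++ divider (PySem.Int.floordiv f 2) by simp]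
        rw [ih (PySem.Int.floordiv f 2).toNat (by omega) _ rfl (by omega) (by omega)
              (xs ++ [f]) FM k0 hk0 (by omega)]
        rw [fiboLoop_pop N xs f _ _ (by omega)]
        rw [stepA_eq _ _ (by omega) (by rw [fillB_length]; omega)]
        rw [fillB_step_big FM f hf]
      · rw [divider_small f hf]
        rw [fiboLoop_pop N xs f FM k0 hk0]
        rw [stepA_eq _ _ (by omega) hlen]
        rw [fillB_step FM f hf]
  intro f
  exact H f.toNat f rfl

-- ========== B-side lemmas: fillB = applyV ∘ chainvalsB ==========

lemma chainvals_step_small (k : Int) (hk : ¬ k > 3) :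
    chainvalsB k = PySem.Dict.empty.insert k
      (if PySem.Int.band k 1 = 0 then tmulB (1, 1, 1, 0) (1, 1, 1, 0)
       else tmulB (tmulB (1, 1, 1, 0) (1, 1, 1, 0)) (1, 1, 1, 0)) := by
  rw [chainvalsB]; simp [hk]

lemma chainvals_step_big (k : Int) (hk : k > 3) :
    chainvalsB k =
      (chainvalsB (PySem.Int.floordiv k 2)).insert k
        (let p := ((chainvalsB (PySem.Int.floordiv k 2)).get? (PySem.Int.floordiv k 2)).getD (0, 0, 0, 0)
         if PySem.Int.band k 1 = 0 then tmulB p p else tmulB (tmulB p p) (1, 1, 1, 0)) := by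
  rw [chainvalsB]; simp [hk]

lemma chainvals_get_self (k : Int) : ∃ w, (chainvalsB k).get? k = some w := by
  by_cases hk : k > 3
  · rw [chainvals_step_big k hk]; exact ⟨_, PySem.Dict.get?_insert_self _ _ _⟩
  · rw [chainvals_step_small k hk]; exact ⟨_, PySem.Dict.get?_insert_self _ _ _⟩

lemma matMUL_toMat (x y : Int × Int × Int × Int) :
    matMUL (toMat x) (toMat y) = toMat (tmulB x y) := by
  obtain ⟨a, b, c, d⟩ := x
  obtain ⟨e, f, g, h⟩ := y
  rfl

lemma matMUL_toMat_UN (x : Int × Int × Int × Int) :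
    matMUL (toMat x) pvUN = toMat x := by
  obtain ⟨a, b, c, d⟩ := x
  simp [matMUL, toMat, pvUN]

lemma pvU1_toMat : pvU1 = toMat (1, 1, 1, 0) := rfl

lemma applyV_length (d : PySem.Dict Int (Int × Int × Int × Int)) (FM : List (List (List Int))) :
    (applyV d FM).length = FM.length := by
  simp [applyV, PySem.List.length_enumerate]

lemma applyV_getElem (d : PySem.Dict Int (Int × Int × Int × Int)) (FM : List (List (List Int)))
    (i : Nat) (hi : i < FM.length) :
    (applyV d FM)[i]'(by rw [applyV_length]; exact hi) =
      match d.get? (i : Int) with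
      | some v => toMat v
      | none => FM[i] := by
  simp [applyV, PySem.List.getElem_enumerate]

lemma applyV_empty (FM : List (List (List Int))) : applyV PySem.Dict.empty FM = FM := by
  apply List.ext_getElem
  · rw [applyV_length]
  · intro i hi hi'
    rw [applyV_getElem _ _ _ hi']
    simp [PySem.Dict.get?_empty]

lemma applyV_getD (d : PySem.Dict Int (Int × Int × Int × Int)) (FM : List (List (List Int)))
    (j : Nat) (hj : j < FM.length) (w : Int × Int × Int × Int)
    (hw : d.get? (j : Int) = some w) :
    PySem.List.pyGetD (applyV d FM) (j : Int) [] = toMat w := by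
  rw [PySem.List.pyGetD_natCast]
  rw [List.getD_eq_getElem _ _ (by rw [applyV_length]; exact hj)]
  rw [applyV_getElem d FM j hj, hw]

lemma applyV_insert (d : PySem.Dict Int (Int × Int × Int × Int)) (FM : List (List (List Int)))
    (k : Int) (v : Int × Int × Int × Int) (h0 : 0 ≤ k) (h1 : k < (FM.length : Int)) :
    PySem.List.pySetD (applyV d FM) k (toMat v) = applyV (d.insert k v) FM := by
  obtain ⟨m, rfl⟩ : ∃ m : Nat, k = (m : Int) := ⟨k.toNat, by omega⟩
  have hm : m < FM.length := by exact_mod_cast h1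
  rw [PySem.List.pySetD_natCast]
  apply List.ext_getElem
  · rw [List.length_set, applyV_length, applyV_length]
  · intro i hi hi'
    have hiF : i < FM.length := by
      rw [List.length_set, applyV_length] at hi; exact hi
    rw [List.getElem_set]
    have hR : (applyV (d.insert ((m : Nat) : Int) v) FM)[i]'hi' =
        match (d.insert ((m : Nat) : Int) v).get? (i : Int) with
        | some u => toMat u
        | none => FM[i] := applyV_getElem _ _ _ hiF
    rw [hR, PySem.Dict.get?_insert, applyV_getElem _ _ _ hiF]
    by_cases he : m = i
    · subst he; simp
    · have hne : ¬ ((i : Int) = ((m : Nat) : Int)) := by omega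
      rw [if_neg he, if_neg hne]

-- band k 1 for 0 ≤ k is k % 2
lemma band_one_nonneg (k : Int) (h : 0 ≤ k) : PySem.Int.band k 1 = k % 2 := by
  rw [PySem.Int.band_one, PySem.Int.mod_eq_emod_of_pos (by omega)]

lemma bridge : ∀ n : Nat, ∀ k : Int, k.toNat = n → 2 ≤ k →
    ∀ FM : List (List (List Int)), k < (FM.length : Int) →
    PySem.List.pyGetD FM 1 [] = pvU1 →
    fillB FM k = applyV (chainvalsB k) FM := by
  intro n
  induction n using Nat.strong_induction_on with
  | _ n ih =>
    intro k hkn h2 FM hlen h1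
    have hb : PySem.Int.band k 1 = k % 2 := band_one_nonneg k (by omega)
    by_cases hk : k > 3
    · -- recursive case
      have hd : PySem.Int.floordiv k 2 = k / 2 := PySem.Int.floordiv_eq_ediv_of_pos (by omega)
      have hrec : fillB FM (PySem.Int.floordiv k 2) = applyV (chainvalsB (PySem.Int.floordiv k 2)) FM :=
        ih (PySem.Int.floordiv k 2).toNat (by omega) _ rfl (by omega) FM (by omega) h1
      obtain ⟨w, hw⟩ := chainvals_get_self (PySem.Int.floordiv k 2)
      have hj : PySem.Int.floordiv k 2 = ((k / 2).toNat : Int) := by omega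
      have hget : PySem.List.pyGetD (fillB FM (PySem.Int.floordiv k 2)) (PySem.Int.floordiv k 2) []
          = toMat w := by
        rw [hrec, hj]
        exact applyV_getD _ FM (k / 2).toNat (by omega) w (by rw [← hj]; exact hw)
      rw [fillB_step_big FM k hk, hget, chainvals_step_big k hk, hrec]
      rw [hj] at hw
      simp only [hj, hw, Option.getD_some]
      rw [← hj]
      by_cases hpar : PySem.Int.band k 1 = 0
      · rw [if_pos hpar, hpar]
        have e0 : PySem.List.pyGetD [pvUN, pvU1] (0 : Int) [] = pvUN := rfl
        rw [e0, matMUL_toMat, matMUL_toMat_UN]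
        exact applyV_insert _ FM k _ (by omega) (by omega)
      · have h1' : PySem.Int.band k 1 = 1 := by omega
        rw [if_neg hpar, h1']
        have e1 : PySem.List.pyGetD [pvUN, pvU1] (1 : Int) [] = pvU1 := rfl
        rw [e1, matMUL_toMat, pvU1_toMat, matMUL_toMat]
        exact applyV_insert _ FM k _ (by omega) (by omega)
    · -- base case: k = 2 or 3, reads FM[1]
      have hd : PySem.Int.floordiv k 2 = 1 := by
        rw [PySem.Int.floordiv_eq_ediv_of_pos (by omega)]; omega
      rw [fillB_step FM k hk, chainvals_step_small k hk, hd, h1]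
      by_cases hpar : PySem.Int.band k 1 = 0
      · rw [if_pos hpar, hpar]
        have e0 : PySem.List.pyGetD [pvUN, pvU1] (0 : Int) [] = pvUN := rfl
        rw [e0, pvU1_toMat, matMUL_toMat, matMUL_toMat_UN,
            ← applyV_insert PySem.Dict.empty FM k _ (by omega) (by omega), applyV_empty]
      · have h1' : PySem.Int.band k 1 = 1 := by omega
        rw [if_neg hpar, h1']
        have e1 : PySem.List.pyGetD [pvUN, pvU1] (1 : Int) [] = pvU1 := rfl
        rw [e1, pvU1_toMat, matMUL_toMat, matMUL_toMat,
            ← applyV_insert PySem.Dict.empty FM k _ (by omega) (by omega), applyV_empty]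

-- ===== VERDICT (by name: the statement is the Claim_ definition above) =====
theorem fiboMatrix_spec : Claim_equal_fiboMatrix := by
  intro N _
  show fiboMatrix N = fiboMatrix_alt N
  have hbase : ([pvU0, pvU1, pvU2] ++ List.replicate (N - 2).toNat pvU0 : List (List (List Int)))
      = [[[0, 0], [0, 0]], [[1, 1], [1, 0]], [[2, 1], [1, 1]]] ++
          List.replicate (N - 2).toNat [[0, 0], [0, 0]] := rfl
  show fiboLoop N (divider N) ([pvU0, pvU1, pvU2] ++ List.replicate (N - 2).toNat pvU0) 2
      = fiboMatrix_alt N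
  by_cases hN : N > 2
  · have hlen : N < (([pvU0, pvU1, pvU2] ++ List.replicate (N - 2).toNat pvU0).length : Int) := by
      simp; omega
    have h := loop_chain N N (by omega) le_rfl []
      ([pvU0, pvU1, pvU2] ++ List.replicate (N - 2).toNat pvU0) 2 (by omega) hlen
    rw [show divider N = [] ++ divider N by simp, h,
        fiboLoop_done N [] _ N (lt_irrefl N)]
    have hget1 : PySem.List.pyGetD
        ([pvU0, pvU1, pvU2] ++ List.replicate (N - 2).toNat pvU0) 1 [] = pvU1 := by
      rw [show (1 : Int) = ((1 : Nat) : Int) from rfl, PySem.List.pyGetD_natCast]; rfl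
    rw [bridge N.toNat N (by omega) (by omega) _ hlen hget1]
    show applyV (chainvalsB N) _ = fiboMatrix_alt N
    unfold fiboMatrix_alt
    rw [if_pos hN, ← hbase]
    rfl
  · rw [fiboLoop_done N _ _ 2 hN]
    unfold fiboMatrix_alt
    rw [if_neg hN, ← hbase]
    show _ = applyV PySem.Dict.empty ([pvU0, pvU1, pvU2] ++ List.replicate (N - 2).toNat pvU0)
    rw [applyV_empty]
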